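-- pv_equiv track=rewrite | github.com/dlamagna/deathstar-context-aware | python/utils.py | compute_service_chains
-- ===== SOURCE A (Python) =====
-- from typing import Dict, List, Tuple, Set
--
-- def _find_roots(edges: List[Tuple[str, str, int]]) -> Set[str]:
--     children = {child for _, child, _ in edges}
--     parents = {parent for parent, _, _ in edges}
--     return parents - children
--
-- def _build_adjacency(edges: List[Tuple[str, str, int]]) -> Dict[str, List[Tuple[str, int]]]:
--     adj: Dict[str, List[Tuple[str, int]]] = {}
--     for parent, child, count in edges:
--         adj.setdefault(parent, []).append((child, count))
--     return adj
--
-- def compute_service_chains(edges: List[Tuple[str, str, int]], max_depth: int = 6) -> List[List[str]]: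
--     """
--     Compute plausible request chains by DFS from root services.
--     Caps depth to avoid cycles and overly long paths.
--     """
--     roots = _find_roots(edges)
--     adj = _build_adjacency(edges)
--
--     chains: List[List[str]] = []
--
--     def dfs(node: str, path: List[str], depth: int, visited: Set[str]):
--         if depth > max_depth:
--             chains.append(path[:])
--             return
--         children = adj.get(node, [])
--         if not children:
--             chains.append(path[:])
--             return
--         for child, _ in sorted(children, key=lambda x: x[1], reverse=True):
--             if child in visited:
--                 continue
--             visited.add(child)
--             path.append(child)
--             dfs(child, path, depth + 1, visited)
--             path.pop()
--             visited.remove(child)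
--
--     # If no clear roots (all nodes are both parents and children), start from high-fan-in parents
--     if not roots and edges:
--         parent_counts: Dict[str, int] = {}
--         for p, _, _ in edges:
--             parent_counts[p] = parent_counts.get(p, 0) + 1
--         roots = {p for p, _ in sorted(parent_counts.items(), key=lambda x: x[1], reverse=True)[:3]}
--
--     for root in sorted(roots):
--         dfs(root, [root], 1, {root})
--
--     # Deduplicate identical chains
--     dedup: Set[Tuple[str, ...]] = set()
--     unique_chains: List[List[str]] = []
--     for c in chains:
--         t = tuple(c)
--         if t not in dedup:
--             dedup.add(t)
--             unique_chains.append(c)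
--     return unique_chains
-- ===== SOURCE B (Python) =====
-- from typing import Dict, List, Tuple, Set
--
-- def _find_roots(edges: List[Tuple[str, str, int]]) -> Set[str]:
--     children = {child for _, child, _ in edges}
--     parents = {parent for parent, _, _ in edges}
--     return parents - children
--
-- def _build_adjacency(edges: List[Tuple[str, str, int]]) -> Dict[str, List[Tuple[str, int]]]:
--     adj: Dict[str, List[Tuple[str, int]]] = {}
--     for parent, child, count in edges:
--         adj.setdefault(parent, []).append((child, count))
--     return adj
--
-- def compute_service_chains(edges: List[Tuple[str, str, int]], max_depth: int = 6) -> List[List[str]]: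
--     """Iterative (explicit-stack) DFS re-implementation; same chains, same order."""
--     roots = _find_roots(edges)
--     adj = _build_adjacency(edges)
--
--     if not roots and edges:
--         parent_counts: Dict[str, int] = {}
--         for p, _, _ in edges:
--             parent_counts[p] = parent_counts.get(p, 0) + 1
--         roots = {p for p, _ in sorted(parent_counts.items(), key=lambda x: x[1], reverse=True)[:3]}
--
--     chains: List[List[str]] = []
--     for root in sorted(roots):
--         stack: List[Tuple[str, List[str]]] = [(root, [root])]
--         while stack:
--             node, path = stack.pop()
--             kids = adj.get(node, [])
--             if len(path) > max_depth or not kids: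
--                 chains.append(path)
--                 continue
--             for kid, _ in reversed(sorted(kids, key=lambda x: x[1], reverse=True)):
--                 if kid not in path:
--                     stack.append((kid, path + [kid]))
--
--     unique_chains: List[List[str]] = []
--     for c in chains:
--         if c not in unique_chains:
--             unique_chains.append(c)
--     return unique_chains
-- ===== Notes on version B (the rewrite author's own statement) =====
-- stated objective: alternative
-- what changed: The recursive closure dfs mutating shared path/visited/chains state is replaced by an iterative DFS over an explicit stack of (node, path) frames (depth = len(path), visited = the nodes already on the path), children pushed in reverse sorted order so pop order matches the recursion; the dedup keeps a plain membership test on the output list instead of a side set of tuples.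
import Mathlib
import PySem

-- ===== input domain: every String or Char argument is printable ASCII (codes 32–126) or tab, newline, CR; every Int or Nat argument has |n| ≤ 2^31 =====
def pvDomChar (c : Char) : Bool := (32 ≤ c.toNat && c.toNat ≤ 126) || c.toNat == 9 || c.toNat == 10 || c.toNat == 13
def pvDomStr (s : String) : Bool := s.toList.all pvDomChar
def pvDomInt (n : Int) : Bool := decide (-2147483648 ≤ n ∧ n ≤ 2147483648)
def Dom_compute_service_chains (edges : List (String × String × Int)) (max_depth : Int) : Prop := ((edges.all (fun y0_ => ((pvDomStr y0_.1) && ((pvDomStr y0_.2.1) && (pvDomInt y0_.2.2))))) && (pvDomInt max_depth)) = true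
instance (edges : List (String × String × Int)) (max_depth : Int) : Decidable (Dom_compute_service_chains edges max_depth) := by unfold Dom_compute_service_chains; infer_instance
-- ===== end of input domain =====

-- B replaces the recursive mutating dfs closure by an iterative DFS over an explicit stack of
-- (node, path) frames (same chains in the same order); alternative decomposition, not faster.


-- ===== PORT A =====
-- helpers _find_roots / _build_adjacency / the no-roots fallback appear verbatim in both
-- Python sources, so both ports call these shared transliterations.
def findRoots (edges : List (String × String × Int)) : PySem.Set String :=
  PySem.Set.diff (PySem.Set.ofList (edges.map (fun e => e.1)))
                 (PySem.Set.ofList (edges.map (fun e => e.2.1)))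

def buildAdjacency (edges : List (String × String × Int)) :
    PySem.Dict String (List (String × Int)) :=
  edges.foldl (fun adj e => adj.modify e.1 [] (fun l => l ++ [(e.2.1, e.2.2)])) PySem.Dict.empty

def fallbackRoots (edges : List (String × String × Int)) : PySem.Set String :=
  let parentCounts :=
    edges.foldl (fun d e => d.insert e.1 (d.getD e.1 0 + 1))
      (PySem.Dict.empty : PySem.Dict String Int)
  PySem.Set.ofList
    ((PySem.List.slice (PySem.List.sorted parentCounts.items (fun x => x.2) true) none (some 3)).map
      (fun x => x.1))

mutual
def dfsA (adj : PySem.Dict String (List (String × Int))) (max_depth : Int)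
    (node : String) (path : List String) (depth : Int) (visited : PySem.Set String)
    (chains : List (List String)) : List (List String) :=
  if h : depth > max_depth then chains ++ [path]
  else
    let children := adj.getD node []
    if children = [] then chains ++ [path]
    else dfsListA adj max_depth (PySem.List.sorted children (fun x => x.2) true) path depth
      (by omega) visited chains
  termination_by ((max_depth + 1 - depth).toNat, 1, 0)
  decreasing_by
  · exact Prod.Lex.right _ (Prod.Lex.left _ _ (by omega))

def dfsListA (adj : PySem.Dict String (List (String × Int))) (max_depth : Int)
    (kids : List (String × Int)) (path : List String) (depth : Int) (hd : depth ≤ max_depth)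
    (visited : PySem.Set String) (chains : List (List String)) : List (List String) :=
  match kids with
  | [] => chains
  | (child, _) :: rest =>
    if PySem.Set.contains visited child then
      dfsListA adj max_depth rest path depth hd visited chains
    else
      dfsListA adj max_depth rest path depth hd visited
        (dfsA adj max_depth child (path ++ [child]) (depth + 1) (PySem.Set.add visited child) chains)
  termination_by ((max_depth + 1 - depth).toNat, 0, kids.length)
  decreasing_by
  · exact Prod.Lex.right _ (Prod.Lex.right _ (by simp))
  · exact Prod.Lex.left _ _ (by omega)
  · exact Prod.Lex.right _ (Prod.Lex.right _ (by simp))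
end

def compute_service_chains (edges : List (String × String × Int)) (max_depth : Int) :
    List (List String) :=
  let roots := findRoots edges
  let adj := buildAdjacency edges
  let roots := if roots = ([] : List String) ∧ edges ≠ [] then fallbackRoots edges else roots
  let chains := (PySem.List.sorted roots (fun x => x) false).foldl
    (fun ch root => dfsA adj max_depth root [root] 1 (PySem.Set.ofList [root]) ch) []
  (chains.foldl
    (fun st c => if PySem.Set.contains st.1 c then st else (PySem.Set.add st.1 c, st.2 ++ [c]))
    ((PySem.Set.empty : PySem.Set (List String)), ([] : List (List String)))).2

-- ===== PORT B =====
-- weight bound used only for termination of the stack loop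
theorem sum_map_foldr_push (E D : Nat) (path : List String) (kids' : List (String × Int))
    (rest : List (String × List String)) :
    (((kids'.foldr (fun k st => if path.contains k.1 then st else (k.1, path ++ [k.1]) :: st)
        rest)).map (fun f => (E + 1) ^ (D + 1 - f.2.length))).sum
      ≤ kids'.length * (E + 1) ^ (D - path.length)
        + ((rest.map (fun f => (E + 1) ^ (D + 1 - f.2.length))).sum) := by
  induction kids' with
  | nil => simp
  | cons k ks ih =>
    simp only [List.foldr_cons]
    split
    · exact le_trans ih (by simp only [List.length_cons, Nat.succ_mul]; linarith [Nat.zero_le ((E + 1) ^ (D - path.length))])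
    · simp only [List.map_cons, List.sum_cons]
      have hw : (E + 1) ^ (D + 1 - (path ++ [k.1]).length) = (E + 1) ^ (D - path.length) := by
        congr 1; simp only [List.length_append, List.length_cons, List.length_nil]; omega
      rw [hw]
      calc (E + 1) ^ (D - path.length) + _
          ≤ (E + 1) ^ (D - path.length)
            + (ks.length * (E + 1) ^ (D - path.length)
               + (List.map (fun f => (E + 1) ^ (D + 1 - f.2.length)) rest).sum) :=
            Nat.add_le_add_left ih _
        _ = _ := by simp only [List.length_cons]; ring

theorem buildAdjacency_len_le_aux (es : List (String × String × Int)) :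
    ∀ (d : PySem.Dict String (List (String × Int))) (n : String),
      ((es.foldl (fun adj e => adj.modify e.1 [] (fun l => l ++ [(e.2.1, e.2.2)])) d).getD n []).length
        ≤ (d.getD n []).length + es.length := by
  induction es with
  | nil => intro d n; simp
  | cons e es ih =>
    intro d n
    simp only [List.foldl_cons, List.length_cons]
    refine le_trans (ih _ n) ?_
    rw [PySem.Dict.getD_modify]
    split
    · next hn =>
      subst hn
      simp only [List.length_append, List.length_cons, List.length_nil]
      omega
    · omega

theorem buildAdjacency_len_le (edges : List (String × String × Int)) :
    ∀ n, ((buildAdjacency edges).getD n []).length ≤ edges.length := by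
  intro n
  have h := buildAdjacency_len_le_aux edges PySem.Dict.empty n
  simpa [buildAdjacency, PySem.Dict.getD_empty] using h

def dfsLoopB (adj : PySem.Dict String (List (String × Int))) (max_depth : Int) (E : Nat)
    (hE : ∀ n, ((adj.getD n []).length ≤ E))
    (stack : List (String × List String)) (chains : List (List String)) : List (List String) :=
  match stack with
  | [] => chains
  | (node, path) :: rest =>
    let kids := adj.getD node []
    if h : (path.length : Int) > max_depth ∨ kids = [] then
      dfsLoopB adj max_depth E hE rest (chains ++ [path])
    else
      dfsLoopB adj max_depth E hE
        ((PySem.List.sorted kids (fun x => x.2) true).foldr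
          (fun k st => if path.contains k.1 then st else (k.1, path ++ [k.1]) :: st) rest)
        chains
termination_by
  (stack.map (fun f => (E + 1) ^ (max_depth.toNat + 1 - f.2.length))).sum
decreasing_by
  · have h0 : 0 < (E + 1) ^ (max_depth.toNat + 1 - path.length) := pow_pos (by omega) _
    simp only [List.map_cons, List.sum_cons]
    omega
  · rw [not_or] at h
    have hL : path.length ≤ max_depth.toNat := by
      have := h.1
      omega
    have hlen : (PySem.List.sorted kids (fun x => x.2) true).length ≤ E := by
      rw [PySem.List.length_sorted]; exact hE node
    have hx : 0 < (E + 1) ^ (max_depth.toNat - path.length) := pow_pos (by omega) _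
    have key := sum_map_foldr_push E max_depth.toNat path
      (PySem.List.sorted kids (fun x => x.2) true) rest
    have hpow : (E + 1) ^ (max_depth.toNat + 1 - path.length)
        = (E + 1) * (E + 1) ^ (max_depth.toNat - path.length) := by
      rw [← pow_succ']
      congr 1
      omega
    simp only [List.map_cons, List.sum_cons]
    calc _ ≤ _ := key
      _ < _ := by
        rw [hpow]
        have h1 : (PySem.List.sorted kids (fun x => x.2) true).length
            * (E + 1) ^ (max_depth.toNat - path.length)
            ≤ E * (E + 1) ^ (max_depth.toNat - path.length) :=
          Nat.mul_le_mul_right _ hlen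
        have h2 : E * (E + 1) ^ (max_depth.toNat - path.length)
            < (E + 1) * (E + 1) ^ (max_depth.toNat - path.length) := by
          rw [Nat.succ_mul]
          omega
        linarith [h1, h2]

def compute_service_chains_alt (edges : List (String × String × Int)) (max_depth : Int) :
    List (List String) :=
  let roots := findRoots edges
  let roots := if roots = ([] : List String) ∧ edges ≠ [] then fallbackRoots edges else roots
  let chains := (PySem.List.sorted roots (fun x => x) false).foldl
    (fun ch root =>
      dfsLoopB (buildAdjacency edges) max_depth edges.length (buildAdjacency_len_le edges)
        [(root, [root])] ch) []
  chains.foldl (fun acc c => if acc.contains c then acc else acc ++ [c]) []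

-- ===== PRECONDITION & SPEC =====
def Spec_compute_service_chains (edges : List (String × String × Int)) (max_depth : Int) (out : List (List String)) : Prop := out = compute_service_chains_alt edges max_depth
instance (edges : List (String × String × Int)) (max_depth : Int) (out : List (List String)) : Decidable (Spec_compute_service_chains edges max_depth out) := by unfold Spec_compute_service_chains; infer_instance

-- ===== CLAIM (what is proved, stated in full; the proofs are below) =====
def Claim_equal_compute_service_chains : Prop := ∀ (edges : List (String × String × Int)) (max_depth : Int), Dom_compute_service_chains edges max_depth → Spec_compute_service_chains edges max_depth (compute_service_chains edges max_depth)

-- ===== LEMMAS AND PROOFS =====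

theorem set_add_invariant {α : Type} [BEq α] [LawfulBEq α] (visited : PySem.Set α)
    (path : List α) (c : α)
    (hinv : ∀ x, PySem.Set.contains visited x = path.contains x)
    (hc : path.contains c = false) :
    ∀ x, PySem.Set.contains (PySem.Set.add visited c) x = (path ++ [c]).contains x := by
  intro x
  have hvc : PySem.Set.contains visited c = false := (hinv c).trans hc
  simp only [PySem.Set.add, PySem.Set.contains] at *
  rw [if_neg (show ¬(List.contains visited c = true) by rw [hvc]; simp)]
  have h2 : x ∈ visited ↔ x ∈ path := by simpa using hinv x
  simp [h2]

theorem dedup_go (chains : List (List String)) :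
    ∀ (s : PySem.Set (List String)) (u : List (List String)),
      (∀ x, PySem.Set.contains s x = u.contains x) →
      ((chains.foldl
          (fun st c => if PySem.Set.contains st.1 c then st else (PySem.Set.add st.1 c, st.2 ++ [c]))
          (s, u)).2)
        = chains.foldl (fun acc c => if acc.contains c then acc else acc ++ [c]) u := by
  induction chains with
  | nil => intro s u _; rfl
  | cons c cs ih =>
    intro s u hinv
    simp only [List.foldl_cons]
    by_cases hc : PySem.Set.contains s c = true
    · rw [if_pos hc, if_pos ((hinv c).symm.trans hc)]
      exact ih s u hinv
    · have hc' : PySem.Set.contains s c = false := by simpa using hc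
      have hu : u.contains c = false := (hinv c).symm.trans hc'
      rw [if_neg (show ¬(PySem.Set.contains s c = true) by rw [hc']; simp),
        if_neg (show ¬(u.contains c = true) by rw [hu]; simp)]
      exact ih _ _ (set_add_invariant s u c hinv hu)

theorem foldr_push_eq (path : List String) (ks : List (String × Int))
    (rest : List (String × List String)) :
    ks.foldr (fun k st => if path.contains k.1 then st else (k.1, path ++ [k.1]) :: st) rest
      = ((ks.filter (fun k => !path.contains k.1)).map (fun k => (k.1, path ++ [k.1]))) ++ rest := by
  induction ks with
  | nil => simp
  | cons k ks ih =>
    simp only [List.foldr_cons, ih, List.filter_cons]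
    by_cases h : k.1 ∈ path <;> simp [h]

theorem dfsLoopB_nil (adj : PySem.Dict String (List (String × Int))) (max_depth : Int) (E : Nat)
    (hE : ∀ n, ((adj.getD n []).length ≤ E)) (chains : List (List String)) :
    dfsLoopB adj max_depth E hE [] chains = chains := by
  rw [dfsLoopB.eq_def]

theorem dfsLoopB_cons (adj : PySem.Dict String (List (String × Int))) (max_depth : Int) (E : Nat)
    (hE : ∀ n, ((adj.getD n []).length ≤ E)) (node : String) (path : List String)
    (rest : List (String × List String)) (chains : List (List String)) :
    dfsLoopB adj max_depth E hE ((node, path) :: rest) chains =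
      if h : (path.length : Int) > max_depth ∨ adj.getD node [] = [] then
        dfsLoopB adj max_depth E hE rest (chains ++ [path])
      else
        dfsLoopB adj max_depth E hE
          ((PySem.List.sorted (adj.getD node []) (fun x => x.2) true).foldr
            (fun k st => if path.contains k.1 then st else (k.1, path ++ [k.1]) :: st) rest)
          chains := by
  rw [dfsLoopB.eq_def]

theorem dfsA_eq (adj : PySem.Dict String (List (String × Int))) (max_depth : Int)
    (node : String) (path : List String) (depth : Int) (visited : PySem.Set String)
    (chains : List (List String)) :
    dfsA adj max_depth node path depth visited chains =
      if h : depth > max_depth then chains ++ [path]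
      else if adj.getD node [] = [] then chains ++ [path]
      else dfsListA adj max_depth (PySem.List.sorted (adj.getD node []) (fun x => x.2) true)
        path depth (by omega) visited chains := by
  rw [dfsA.eq_def]

theorem dfsListA_nil (adj : PySem.Dict String (List (String × Int))) (max_depth : Int)
    (path : List String) (depth : Int) (hd : depth ≤ max_depth) (visited : PySem.Set String)
    (chains : List (List String)) :
    dfsListA adj max_depth [] path depth hd visited chains = chains := by
  rw [dfsListA.eq_def]

theorem dfsListA_cons (adj : PySem.Dict String (List (String × Int))) (max_depth : Int)
    (c : String) (w : Int) (rest : List (String × Int)) (path : List String) (depth : Int)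
    (hd : depth ≤ max_depth) (visited : PySem.Set String) (chains : List (List String)) :
    dfsListA adj max_depth ((c, w) :: rest) path depth hd visited chains =
      if PySem.Set.contains visited c then
        dfsListA adj max_depth rest path depth hd visited chains
      else
        dfsListA adj max_depth rest path depth hd visited
          (dfsA adj max_depth c (path ++ [c]) (depth + 1) (PySem.Set.add visited c) chains) := by
  rw [dfsListA.eq_def]

theorem loopB_append (adj : PySem.Dict String (List (String × Int))) (max_depth : Int) (E : Nat)
    (hE : ∀ n, ((adj.getD n []).length ≤ E)) (s₁ : List (String × List String))
    (chains : List (List String)) (s₂ : List (String × List String)) :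
    dfsLoopB adj max_depth E hE (s₁ ++ s₂) chains
      = dfsLoopB adj max_depth E hE s₂ (dfsLoopB adj max_depth E hE s₁ chains) := by
  induction s₁, chains using dfsLoopB.induct adj max_depth E hE with
  | case1 chains => simp only [List.nil_append, dfsLoopB_nil]
  | case2 chains node path rest kids h ih =>
    show dfsLoopB adj max_depth E hE ((node, path) :: (rest ++ s₂)) chains = _
    rw [dfsLoopB_cons, dif_pos h]
    conv_rhs => rw [dfsLoopB_cons, dif_pos h]
    exact ih
  | case3 chains node path rest kids h ih =>
    show dfsLoopB adj max_depth E hE ((node, path) :: (rest ++ s₂)) chains = _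
    rw [dfsLoopB_cons, dif_neg h]
    conv_rhs => rw [dfsLoopB_cons, dif_neg h]
    simp only [dite_eq_ite, foldr_push_eq] at ih ⊢
    rw [List.append_assoc] at ih
    exact ih

theorem mainP (adj : PySem.Dict String (List (String × Int))) (max_depth : Int) (E : Nat)
    (hE : ∀ n, ((adj.getD n []).length ≤ E)) :
    ∀ (k : Nat) (node : String) (path : List String) (depth : Int)
      (visited : PySem.Set String) (chains : List (List String)),
      (max_depth + 1 - depth).toNat ≤ k → depth = (path.length : Int) →
      (∀ x, PySem.Set.contains visited x = path.contains x) →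
      dfsA adj max_depth node path depth visited chains
        = dfsLoopB adj max_depth E hE [(node, path)] chains := by
  intro k
  induction k with
  | zero =>
    intro node path depth visited chains hk hdep hinv
    have h1 : depth > max_depth := by omega
    rw [dfsA_eq, dif_pos h1, dfsLoopB_cons,
      dif_pos (Or.inl (show (path.length : Int) > max_depth by omega)), dfsLoopB_nil]
  | succ k ihk =>
    intro node path depth visited chains hk hdep hinv
    by_cases h1 : depth > max_depth
    · rw [dfsA_eq, dif_pos h1, dfsLoopB_cons,
        dif_pos (Or.inl (show (path.length : Int) > max_depth by omega)), dfsLoopB_nil]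
    · rw [dfsA_eq, dif_neg h1, dfsLoopB_cons]
      by_cases h2 : (adj.getD node []) = []
      · rw [if_pos h2, dif_pos (Or.inr h2), dfsLoopB_nil]
      · have hcond : ¬(((path.length : Int) > max_depth) ∨ adj.getD node [] = []) := by
          rintro (hh | hh)
          · omega
          · exact h2 hh
        rw [if_neg h2, dif_neg hcond, foldr_push_eq, List.append_nil]
        have hdle : depth ≤ max_depth := by omega
        have inner : ∀ (ks : List (String × Int)) (chains : List (List String)),
            dfsListA adj max_depth ks path depth hdle visited chains
              = dfsLoopB adj max_depth E hE
                  ((ks.filter (fun k => !path.contains k.1)).map (fun k => (k.1, path ++ [k.1])))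
                  chains := by
          intro ks
          induction ks with
          | nil =>
            intro chains
            rw [dfsListA_nil]
            simp only [List.filter_nil, List.map_nil]
            rw [dfsLoopB_nil]
          | cons kk ks ih =>
            intro chains
            obtain ⟨c, w⟩ := kk
            rw [dfsListA_cons]
            by_cases hc : PySem.Set.contains visited c = true
            · have hpc : path.contains c = true := (hinv c).symm.trans hc
              rw [if_pos hc]
              simp only [List.filter_cons, hpc, Bool.not_true]
              exact ih chains
            · have hpc : path.contains c = false := by
                rw [← hinv c]; simpa using hc
              rw [if_neg hc]
              have hfil : List.filter (fun k => !path.contains k.1) ((c, w) :: ks)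
                  = (c, w) :: List.filter (fun k => !path.contains k.1) ks := by
                have hcm : c ∉ path := by simpa using hpc
                simp [hcm]
              rw [hfil, List.map_cons]
              have hsplit := loopB_append adj max_depth E hE [(c, path ++ [c])] chains
                ((ks.filter (fun k => !path.contains k.1)).map (fun k => (k.1, path ++ [k.1])))
              simp only [List.singleton_append] at hsplit
              rw [hsplit]
              rw [← ihk c (path ++ [c]) (depth + 1) (PySem.Set.add visited c) chains
                  (by omega) (by rw [hdep]; simp)
                  (set_add_invariant visited path c hinv hpc)]
              exact ih _
        exact inner _ chains

-- ===== VERDICT (by name: the statement is the Claim_ definition above) =====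
theorem compute_service_chains_spec : Claim_equal_compute_service_chains := by
  intro edges max_depth _
  show compute_service_chains edges max_depth = compute_service_chains_alt edges max_depth
  have hch : ∀ (roots : List String),
      roots.foldl
        (fun ch root => dfsA (buildAdjacency edges) max_depth root [root] 1
          (PySem.Set.ofList [root]) ch) []
      = roots.foldl
        (fun ch root => dfsLoopB (buildAdjacency edges) max_depth edges.length
          (buildAdjacency_len_le edges) [(root, [root])] ch) [] := by
    intro roots
    apply List.foldl_ext
    intro a b _
    exact mainP (buildAdjacency edges) max_depth edges.length (buildAdjacency_len_le edges)
      (max_depth + 1 - 1).toNat b [b] 1 (PySem.Set.ofList [b]) a le_rfl (by simp)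
      (fun _ => rfl)
  simp only [compute_service_chains, compute_service_chains_alt]
  rw [hch]
  exact dedup_go _ PySem.Set.empty [] (fun _ => rfl)
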